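-- pv_equiv track=rewrite | github.com/whale0112/PythonAdvance | 19강/문제6.py | solution
-- ===== SOURCE A (Python) =====
-- def solution(commands):
--     answer = [0, 0]
--     for c in commands:
--         if c == 'L':
--             answer[0] -= 1
--         elif c == 'R':
--             answer[0] += 1
--         elif c == 'U':
--             answer[1] += 1
--         else:
--             answer[1] -= 1
--     return answer
-- ===== SOURCE B (Python) =====
-- def solution(commands):
--     cnt = {}
--     for c in commands:
--         cnt[c] = cnt.get(c, 0) + 1
--     L = cnt.get('L', 0)
--     R = cnt.get('R', 0)
--     U = cnt.get('U', 0)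
--     return [R - L, U - (len(commands) - L - R - U)]
-- ===== Notes on version B (the rewrite author's own statement) =====
-- stated objective: alternative
-- what changed: B replaces the per-character branch-and-accumulate with a one-pass character tally (dict counter) followed by a closed-form computation: x = R - L, y = U - (len - L - R - U), where the down-count is the remainder so the catch-all else is reproduced exactly.
import Mathlib
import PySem

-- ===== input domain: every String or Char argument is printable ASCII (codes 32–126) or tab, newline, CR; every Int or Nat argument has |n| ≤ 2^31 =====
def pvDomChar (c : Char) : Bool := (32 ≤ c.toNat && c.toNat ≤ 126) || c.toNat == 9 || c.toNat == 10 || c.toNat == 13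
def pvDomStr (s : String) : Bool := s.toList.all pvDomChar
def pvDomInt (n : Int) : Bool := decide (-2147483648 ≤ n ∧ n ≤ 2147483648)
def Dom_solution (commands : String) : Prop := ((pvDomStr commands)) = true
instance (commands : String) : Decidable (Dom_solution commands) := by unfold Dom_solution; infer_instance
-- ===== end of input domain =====

-- ===== PORT A =====
-- literal port of A: fold over the characters updating the [x, y] accumulator
def solution (commands : String) : List Int :=
  let answer := commands.toList.foldl
    (fun (a : Int × Int) c =>
      if c = 'L' then (a.1 - 1, a.2)
      else if c = 'R' then (a.1 + 1, a.2)
      else if c = 'U' then (a.1, a.2 + 1)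
      else (a.1, a.2 - 1))
    (0, 0)
  [answer.1, answer.2]

-- ===== PORT B =====
-- port of B: one-pass dict tally, then closed-form arithmetic
def solution_alt (commands : String) : List Int :=
  let cnt := commands.toList.foldl
    (fun (d : PySem.Dict Char Int) c => d.insert c (d.getD c 0 + 1)) PySem.Dict.empty
  let L := cnt.getD 'L' 0
  let R := cnt.getD 'R' 0
  let U := cnt.getD 'U' 0
  [R - L, U - ((PySem.Str.len commands : Int) - L - R - U)]

-- ===== PRECONDITION & SPEC =====
def Spec_solution (commands : String) (out : List Int) : Prop := out = solution_alt commands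
instance (commands : String) (out : List Int) : Decidable (Spec_solution commands out) := by unfold Spec_solution; infer_instance

-- ===== CLAIM (what is proved, stated in full; the proofs are below) =====
def Claim_equal_solution : Prop := ∀ (commands : String), Dom_solution commands → Spec_solution commands (solution commands)

-- ===== LEMMAS AND PROOFS =====

-- ===== VERDICT (by name: the statement is the Claim_ definition above) =====
theorem solution_fold (l : List Char) (x y : Int) :
    l.foldl
      (fun (a : Int × Int) c =>
        if c = 'L' then (a.1 - 1, a.2)
        else if c = 'R' then (a.1 + 1, a.2)
        else if c = 'U' then (a.1, a.2 + 1)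
        else (a.1, a.2 - 1)) (x, y)
    = (x + l.count 'R' - l.count 'L',
       y + l.count 'U' - ((l.length : Int) - l.count 'L' - l.count 'R' - l.count 'U')) := by
  induction l generalizing x y with
  | nil => simp
  | cons c t ih =>
    simp only [List.foldl_cons, List.count_cons, List.length_cons]
    by_cases hL : c = 'L' <;> by_cases hR : c = 'R' <;> by_cases hU : c = 'U' <;>
      simp_all [ih] <;> (try (push_cast; ring_nf)) <;> (try exact ⟨trivial, trivial⟩)

theorem solution_spec : Claim_equal_solution := by
  intro commands _
  unfold Spec_solution solution solution_alt
  simp only [PySem.Dict.getD_foldl_insert_add_one, PySem.Dict.getD_empty, PySem.Str.len_eq,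
    solution_fold]
  simp
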